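-- pv_equiv track=rewrite | github.com/RotemAmir22/HW3 | hw3.py | split_text_to_tokens
-- ===== SOURCE A (Python) =====
-- def split_text_to_tokens(text):
--     """
--     cleans text from characters that are not letters in the alphabet
--
--     :param text: the text needed to be cleaned (string)
--     :return: list of clean word from the text (list[string])
--     """
--     temp_text = text.split()  # splits words in text to values in a list
--     clean_list = []  # list of clean words
--
--     for word in temp_text:
--         new_word = ""  # clean word to add the clean list
--         for char in range(len(word)):
--             if 65 <= ord(word[char]) <= 90 or 97 <= ord(word[char]) <= 122:  # checks if the char is a letter
--                 new_word += word[char]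
--             if char == len(word) - 1 and new_word != "":  # no letters in the clean word -> its not a word
--                 clean_list.append(new_word)
--
--     return clean_list
-- ===== SOURCE B (Python) =====
-- def split_text_to_tokens(text):
--     """
--     cleans text from characters that are not letters in the alphabet
--
--     :param text: the text needed to be cleaned (string)
--     :return: list of clean word from the text (list[string])
--     """
--     cleaned = "".join(c for c in text
--                       if 'a' <= c <= 'z' or 'A' <= c <= 'Z' or c.isspace())
--     return cleaned.split()
-- ===== Notes on version B (the rewrite author's own statement) =====
-- stated objective: simpler
-- what changed: A splits the text into words first and then filters each word with an indexed character loop and a last-index append; B makes one pass over the whole text keeping letters and whitespace, then splits the cleaned string once (filter-then-split instead of split-then-filter).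
import Mathlib
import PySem

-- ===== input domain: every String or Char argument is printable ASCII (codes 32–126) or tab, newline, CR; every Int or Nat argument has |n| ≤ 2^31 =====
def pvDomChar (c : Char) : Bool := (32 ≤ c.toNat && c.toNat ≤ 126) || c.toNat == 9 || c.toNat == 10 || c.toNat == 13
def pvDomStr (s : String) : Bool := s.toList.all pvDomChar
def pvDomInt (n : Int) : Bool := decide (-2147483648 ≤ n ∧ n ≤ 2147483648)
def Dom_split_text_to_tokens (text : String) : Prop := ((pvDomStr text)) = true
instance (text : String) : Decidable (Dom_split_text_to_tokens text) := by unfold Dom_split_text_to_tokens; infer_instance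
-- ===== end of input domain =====

-- B cleans the whole text in one pass (keep letters and whitespace) and splits once,
-- instead of A's split-then-per-word indexed filtering loop; return values proved equal.

-- ===== PORT A =====
-- the body of A's inner 'for char in range(len(word))' loop; state = (new_word, clean_list)
def pvStepA (w : List Char) (st : List Char × List String) (ch : Int) : List Char × List String :=
  let c := PySem.List.pyGetD w ch ' '   -- word[char]; always in range here
  let nw := if (65 ≤ c.toNat ∧ c.toNat ≤ 90) ∨ (97 ≤ c.toNat ∧ c.toNat ≤ 122) then st.1 ++ [c] else st.1
  let cl := if ch = (w.length : Int) - 1 ∧ nw ≠ [] then st.2 ++ [String.ofList nw] else st.2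
  (nw, cl)

def split_text_to_tokens (text : String) : List String :=
  let temp_text := PySem.Str.split₀ text
  temp_text.foldl
    (fun clean_list word =>
      ((PySem.List.pyRange 0 (PySem.Str.len word) 1).foldl
        (pvStepA word.toList) ([], clean_list)).2)
    []

-- ===== PORT B =====
def split_text_to_tokens_alt (text : String) : List String :=
  let cleaned := String.ofList (text.toList.filter
    (fun c => decide ('a' ≤ c ∧ c ≤ 'z') || decide ('A' ≤ c ∧ c ≤ 'Z') || PySem.Chars.isspace c))
  PySem.Str.split₀ cleaned

-- ===== PRECONDITION & SPEC =====
def Spec_split_text_to_tokens (text : String) (out : List String) : Prop := out = split_text_to_tokens_alt text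
instance (text : String) (out : List String) : Decidable (Spec_split_text_to_tokens text out) := by unfold Spec_split_text_to_tokens; infer_instance

-- ===== CLAIM (what is proved, stated in full; the proofs are below) =====
def Claim_equal_split_text_to_tokens : Prop := ∀ (text : String), Dom_split_text_to_tokens text → Spec_split_text_to_tokens text (split_text_to_tokens text)

-- ===== LEMMAS AND PROOFS =====

def pvLetter (c : Char) : Bool :=
  decide (65 ≤ c.toNat ∧ c.toNat ≤ 90) || decide (97 ≤ c.toNat ∧ c.toNat ≤ 122)

def pvKeep (c : Char) : Bool := pvLetter c || PySem.Chars.isspace c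

def pvG (w : List Char) : Option (List Char) :=
  if (w.filter pvLetter).isEmpty then none else some (w.filter pvLetter)

-- B's keep-predicate is pvKeep
lemma pvKeep_eq (c : Char) :
    (decide ('a' ≤ c ∧ c ≤ 'z') || decide ('A' ≤ c ∧ c ≤ 'Z') || PySem.Chars.isspace c) = pvKeep c := by
  have h : (decide ('a' ≤ c ∧ c ≤ 'z') || decide ('A' ≤ c ∧ c ≤ 'Z')) = pvLetter c := by
    simp only [Char.le_def, UInt32.le_iff_toNat_le]
    show (decide (97 ≤ c.toNat ∧ c.toNat ≤ 122) || decide (65 ≤ c.toNat ∧ c.toNat ≤ 90)) = _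
    rw [Bool.or_comm]; rfl
  rw [pvKeep, ← h]

-- A's inner loop from index k (k < |w|) with accumulated state (nw, cl)
lemma pvInner (w : List Char) :
    ∀ (m k : Nat), m = w.length - k → k < w.length → ∀ (nw : List Char) (cl : List String),
      (PySem.List.pyRange (k : Int) (w.length : Int) 1).foldl (pvStepA w) (nw, cl) =
        (nw ++ (w.drop k).filter pvLetter,
         if nw ++ (w.drop k).filter pvLetter = [] then cl
         else cl ++ [String.ofList (nw ++ (w.drop k).filter pvLetter)]) := by
  intro m
  induction m with
  | zero => intro k hm hk nw cl; omega
  | succ m ih =>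
    intro k hm hk nw cl
    rw [PySem.List.pyRange_one_cons (by exact_mod_cast hk)]
    rw [List.foldl_cons]
    have hget : PySem.List.pyGetD w (k : Int) ' ' = w[k] := by
      rw [PySem.List.pyGetD_natCast, List.getD_eq_getElem w ' ' hk]
    by_cases hlast : k + 1 = w.length
    · -- last index
      have hnil : PySem.List.pyRange ((k : Int) + 1) (w.length : Int) 1 = [] :=
        PySem.List.pyRange_one_eq_nil (by omega)
      have hdrop : w.drop k = [w[k]] := by
        rw [List.drop_eq_getElem_cons hk, List.drop_eq_nil_of_le (by omega)]
      rw [hnil, List.foldl_nil, pvStepA, hget]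
      have hcond : ((k : Int) = (w.length : Int) - 1) := by omega
      by_cases hl : (65 ≤ (w[k]).toNat ∧ (w[k]).toNat ≤ 90) ∨ (97 ≤ (w[k]).toNat ∧ (w[k]).toNat ≤ 122)
      · have hpl : pvLetter w[k] = true := by simp [pvLetter]; omega
        simp only [if_pos hl, hdrop, List.filter_cons, hpl, List.filter_nil]
        simp [hcond]
      · have hpl : pvLetter w[k] = false := by simp [pvLetter]; omega
        simp only [if_neg hl, hdrop, List.filter_cons, hpl, List.filter_nil]
        simp [hcond]
    · -- not the last index
      have hk1 : k + 1 < w.length := by omega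
      have hcond : ¬ ((k : Int) = (w.length : Int) - 1) := by omega
      have hdrop : w.drop k = w[k] :: w.drop (k + 1) := List.drop_eq_getElem_cons hk
      rw [pvStepA, hget]
      simp only [hcond, false_and, if_false]
      by_cases hl : (65 ≤ (w[k]).toNat ∧ (w[k]).toNat ≤ 90) ∨ (97 ≤ (w[k]).toNat ∧ (w[k]).toNat ≤ 122)
      · have hpl : pvLetter w[k] = true := by simp [pvLetter]; omega
        simp only [if_pos hl]
        rw [show ((k : Int) + 1) = ((k + 1 : Nat) : Int) by push_cast; ring,
            ih (k + 1) (by omega) hk1 (nw ++ [w[k]]) cl,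
            hdrop, List.filter_cons_of_pos hpl]
        simp [List.append_assoc]
      · have hpl : pvLetter w[k] = false := by simp [pvLetter]; omega
        simp only [if_neg hl]
        rw [show ((k : Int) + 1) = ((k + 1 : Nat) : Int) by push_cast; ring,
            ih (k + 1) (by omega) hk1 nw cl,
            hdrop, List.filter_cons_of_neg (by simp [hpl])]

-- A's per-word handling: append the letter-filtered word iff it is nonempty
lemma pvWordA (w : List Char) (cl : List String) :
    ((PySem.List.pyRange 0 (w.length : Int) 1).foldl (pvStepA w) ([], cl)).2 =
      if (!(w.filter pvLetter).isEmpty) = true then cl ++ [String.ofList (w.filter pvLetter)] else cl := by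
  rcases w with _ | ⟨c, w'⟩
  · simp [PySem.List.pyRange_one_eq_nil]
  · have h0 : 0 < (c :: w').length := by simp
    have := pvInner (c :: w') ((c :: w').length) 0 (by omega) h0 [] cl
    simp only [Nat.cast_zero, List.drop_zero, List.nil_append] at this
    rw [this]
    by_cases hne : (c :: w').filter pvLetter = [] <;>
      simp [hne]

-- filterMap pvG is "filter out words with no letters, keep the letters of the rest"
lemma pvFilterMap_eq (ws : List (List Char)) :
    ws.filterMap pvG =
      (ws.filter (fun w => !(w.filter pvLetter).isEmpty)).map (List.filter pvLetter) := by
  induction ws with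
  | nil => rfl
  | cons w ws ih =>
    rw [List.filterMap_cons, List.filter_cons]
    by_cases h : (w.filter pvLetter).isEmpty
    · have hg : pvG w = none := by simp only [pvG, if_pos h]
      rw [hg]; simp [h, ih]
    · have hg : pvG w = some (w.filter pvLetter) := by simp only [pvG, if_neg h]
      rw [hg]; simp [h, ih]

-- the core: splitting the cleaned text = cleaning each split word and dropping empties
lemma pvGo (s : List Char) :
    ∀ (cur : List Char) (acc : List (List Char)),
      PySem.Chars.split₀.go (s.filter pvKeep) (cur.filter pvLetter) (acc.filterMap pvG) =
        (PySem.Chars.split₀.go s cur acc).filterMap pvG := by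
  induction s with
  | nil =>
    intro cur acc
    simp only [List.filter_nil, PySem.Chars.split₀.go]
    by_cases hc : cur.isEmpty
    · have : cur = [] := by simpa [List.isEmpty_iff] using hc
      simp [this]
    · simp only [hc, if_neg, Bool.not_eq_true]
      by_cases hf : (cur.filter pvLetter).isEmpty
      · have hfn : cur.filter pvLetter = [] := by simpa [List.isEmpty_iff] using hf
        have hg : pvG cur.reverse = none := by
          simp [pvG, List.filter_reverse, hfn]
        simp [hfn, hg, List.filterMap_reverse]
      · have hfn : cur.filter pvLetter ≠ [] := by simpa [List.isEmpty_iff] using hf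
        have hg : pvG cur.reverse = some ((cur.filter pvLetter).reverse) := by
          simp [pvG, List.filter_reverse, List.isEmpty_iff, hfn]
        simp [hf, hg, List.filterMap_reverse]
  | cons c s' ih =>
    intro cur acc
    by_cases hsp : PySem.Chars.isspace c
    · have hkeep : pvKeep c = true := by simp [pvKeep, hsp]
      rw [List.filter_cons_of_pos hkeep]
      simp only [PySem.Chars.split₀.go, hsp, if_pos]
      by_cases hc : cur.isEmpty
      · have hcn : cur = [] := by simpa [List.isEmpty_iff] using hc
        subst hcn
        simpa using ih [] acc
      · have hcn : cur ≠ [] := by simpa [List.isEmpty_iff] using hc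
        simp only [hc, Bool.false_eq_true, if_false]
        by_cases hf : (cur.filter pvLetter).isEmpty
        · have hfn : cur.filter pvLetter = [] := by simpa [List.isEmpty_iff] using hf
          have hg : pvG cur.reverse = none := by simp [pvG, List.filter_reverse, hfn]
          have := ih [] (cur.reverse :: acc)
          simp only [List.filter_nil, List.filterMap_cons, hg] at this
          simpa [hfn] using this
        · have hfn : cur.filter pvLetter ≠ [] := by simpa [List.isEmpty_iff] using hf
          have hg : pvG cur.reverse = some ((cur.filter pvLetter).reverse) := by
            simp [pvG, List.filter_reverse, List.isEmpty_iff, hfn]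
          have := ih [] ((cur.reverse) :: acc)
          simp only [List.filter_nil, List.filterMap_cons, hg] at this
          simpa [hf, List.filter_reverse] using this
    · by_cases hl : pvLetter c
      · have hkeep : pvKeep c = true := by simp [pvKeep, hl]
        rw [List.filter_cons_of_pos hkeep]
        simp only [PySem.Chars.split₀.go, hsp, Bool.false_eq_true, if_false]
        have : c :: cur.filter pvLetter = (c :: cur).filter pvLetter := by
          simp [hl]
        rw [this]
        exact ih (c :: cur) acc
      · have hkeep : pvKeep c = false := by simp [pvKeep, hl, hsp]
        rw [List.filter_cons_of_neg (by simp [hkeep])]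
        simp only [PySem.Chars.split₀.go, hsp, Bool.false_eq_true, if_false]
        have : cur.filter pvLetter = (c :: cur).filter pvLetter := by
          simp [hl]
        rw [this]
        exact ih (c :: cur) acc

lemma pvSplitClean (l : List Char) :
    PySem.Chars.split₀ (l.filter pvKeep) = (PySem.Chars.split₀ l).filterMap pvG := by
  have := pvGo l [] []
  simpa [PySem.Chars.split₀] using this

-- ===== VERDICT (by name: the statement is the Claim_ definition above) =====
theorem split_text_to_tokens_spec : Claim_equal_split_text_to_tokens := by
  intro text _
  unfold Spec_split_text_to_tokens split_text_to_tokens split_text_to_tokens_alt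
  simp only []
  -- A side: rewrite each word's inner loop, then collapse the outer fold
  have hlen : ∀ w : String, PySem.Str.len w = ((w.toList.length : Nat) : Int) := by
    intro w; simp [PySem.Str.len_eq]
  have hA : (PySem.Str.split₀ text).foldl
      (fun clean_list word =>
        ((PySem.List.pyRange 0 (PySem.Str.len word) 1).foldl
          (pvStepA word.toList) ([], clean_list)).2) [] =
      (PySem.Str.split₀ text).foldl
        (fun acc w => if (!(w.toList.filter pvLetter).isEmpty) = true
          then acc ++ [String.ofList (w.toList.filter pvLetter)] else acc) [] := by
    apply PySem.List.foldl_congr_mem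
    intro cl w _
    rw [hlen w, pvWordA]
  rw [hA, PySem.List.foldl_append_if]
  -- B side: the filter predicate is pvKeep
  have hBfilter : text.toList.filter
      (fun c => decide ('a' ≤ c ∧ c ≤ 'z') || decide ('A' ≤ c ∧ c ≤ 'Z') || PySem.Chars.isspace c) =
      text.toList.filter pvKeep := by
    apply List.filter_congr; intro c _; exact pvKeep_eq c
  have hB : PySem.Str.split₀ (String.ofList (text.toList.filter
      (fun c => decide ('a' ≤ c ∧ c ≤ 'z') || decide ('A' ≤ c ∧ c ≤ 'Z') || PySem.Chars.isspace c))) =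
      ((PySem.Chars.split₀ text.toList).filterMap pvG).map String.ofList := by
    show ((PySem.Chars.split₀ (String.ofList _).toList).map String.ofList) = _
    rw [String.toList_ofList, hBfilter, pvSplitClean]
  rw [hB, pvFilterMap_eq]
  -- both sides are now maps/filters over the raw split words
  show [] ++ _ = _
  rw [List.nil_append]
  show List.map _ (List.filter _ ((PySem.Chars.split₀ text.toList).map String.ofList)) = _
  rw [List.filter_map, List.map_map, List.map_map]
  have hfil : List.filter ((fun w => !(List.filter pvLetter w.toList).isEmpty) ∘ String.ofList)
      (PySem.Chars.split₀ text.toList) =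
      List.filter (fun w => !(List.filter pvLetter w).isEmpty) (PySem.Chars.split₀ text.toList) := by
    apply List.filter_congr
    intro w _
    simp [Function.comp, String.toList_ofList]
  rw [hfil]
  apply List.map_congr_left
  intro w hw
  simp [Function.comp, String.toList_ofList]
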